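-- pv_equiv track=rewrite | github.com/JackLin1015/python_1141_01357023 | week4/hw4-2.py | is_mirrored
-- ===== SOURCE A (Python) =====
-- mirror_map = {
--     'A':'A','E':'3','3':'E','H':'H','I':'I','J':'L','L':'J',
--     'M':'M','O':'O','S':'2','2':'S','T':'T','U':'U','V':'V',
--     'W':'W','X':'X','Y':'Y','1':'1','Z':'5','5':'Z','8':'8'
-- }
--
-- def is_mirrored(data, left, right):
--     if left > right:
--         return True
--     if left == right:
--         ch = data[left]
--         return ch in mirror_map and mirror_map[ch] == ch
--     le = data[left]
--     ri = data[right]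
--     if le not in mirror_map:
--         return False
--     if mirror_map[le] != ri:
--         return False
--     return is_mirrored(data, left + 1, right - 1)
-- ===== SOURCE B (Python) =====
-- mirror_map = {
--     'A':'A','E':'3','3':'E','H':'H','I':'I','J':'L','L':'J',
--     'M':'M','O':'O','S':'2','2':'S','T':'T','U':'U','V':'V',
--     'W':'W','X':'X','Y':'Y','1':'1','Z':'5','5':'Z','8':'8'
-- }
--
-- def is_mirrored(data, left, right):
--     while left < right:
--         if mirror_map.get(data[left]) != data[right]:
--             return False
--         left += 1
--         right -= 1
--     if left == right:
--         ch = data[left]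
--         return mirror_map.get(ch) == ch
--     return True
-- ===== Notes on version B (the rewrite author's own statement) =====
-- stated objective: idiomatic
-- what changed: The inward recursion is replaced by an iterative two-pointer while-loop, and each pair's two membership+lookup checks are merged into a single dict.get comparison.
import Mathlib
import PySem

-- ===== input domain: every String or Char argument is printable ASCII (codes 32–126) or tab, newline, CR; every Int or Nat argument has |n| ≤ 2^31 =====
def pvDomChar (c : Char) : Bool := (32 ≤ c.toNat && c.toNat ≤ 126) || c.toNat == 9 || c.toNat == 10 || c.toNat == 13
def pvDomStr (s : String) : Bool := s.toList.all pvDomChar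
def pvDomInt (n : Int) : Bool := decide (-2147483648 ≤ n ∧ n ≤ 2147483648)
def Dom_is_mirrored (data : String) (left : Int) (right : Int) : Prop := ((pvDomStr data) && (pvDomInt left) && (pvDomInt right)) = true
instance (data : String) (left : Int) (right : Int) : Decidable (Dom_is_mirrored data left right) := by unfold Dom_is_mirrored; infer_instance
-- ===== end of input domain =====

-- B replaces A's inward recursion by an iterative two-pointer loop and merges the
-- membership test and lookup of each pair into one dict.get comparison (objective: idiomatic).

-- shared module-level constant (the Python file's global mirror_map, used by both A and B)
def mirrorMap : PySem.Dict Char Char := PySem.Dict.ofList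
  [('A','A'),('E','3'),('3','E'),('H','H'),('I','I'),('J','L'),('L','J'),
   ('M','M'),('O','O'),('S','2'),('2','S'),('T','T'),('U','U'),('V','V'),
   ('W','W'),('X','X'),('Y','Y'),('1','1'),('Z','5'),('5','Z'),('8','8')]

-- ===== PORT A =====
def is_mirrored (data : String) (left : Int) (right : Int) : Bool :=
  if left > right then true
  else if left = right then
    match PySem.Str.pyGet? data left with
    | some ch => (mirrorMap.contains ch) && (mirrorMap.get? ch == some ch)
    | none => false  -- Python raises IndexError here; excluded by Pre_
  else
    match PySem.Str.pyGet? data left, PySem.Str.pyGet? data right with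
    | some le, some ri =>
      if mirrorMap.contains le = false then false
      else if mirrorMap.get? le ≠ some ri then false
      else is_mirrored data (left + 1) (right - 1)
    | _, _ => false  -- Python raises IndexError here; excluded by Pre_
termination_by (right - left + 1).toNat
decreasing_by omega

-- ===== PORT B =====
-- the while-loop of B
def mirrorLoop (data : String) (left : Int) (right : Int) : Bool :=
  if left < right then
    -- Python raises IndexError on a missing index; 'false' there is excluded by Pre_
    (PySem.Str.pyGet? data left).elim false (fun le =>
      (PySem.Str.pyGet? data right).elim false (fun ri =>
        if mirrorMap.get? le != some ri then false
        else mirrorLoop data (left + 1) (right - 1)))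
  else if left = right then
    (PySem.Str.pyGet? data left).elim false (fun ch => mirrorMap.get? ch == some ch)
  else true
termination_by (right - left).toNat
decreasing_by omega

def is_mirrored_alt (data : String) (left : Int) (right : Int) : Bool :=
  mirrorLoop data left right

-- ===== PRECONDITION & SPEC =====
-- Exactly the inputs on which the Python A returns: either no index is read (left > right),
-- or every index in [left, right] is a valid Python index into data.
def Pre_is_mirrored (data : String) (left : Int) (right : Int) : Prop :=
  left > right ∨ (-(data.length : Int) ≤ left ∧ right < (data.length : Int))
instance (data : String) (left : Int) (right : Int) : Decidable (Pre_is_mirrored data left right) := by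
  unfold Pre_is_mirrored; infer_instance

def pvWitness_is_mirrored : String × Int × Int := ("AIA", 0, 2)

def Spec_is_mirrored (data : String) (left : Int) (right : Int) (out : Bool) : Prop := out = is_mirrored_alt data left right
instance (data : String) (left : Int) (right : Int) (out : Bool) : Decidable (Spec_is_mirrored data left right out) := by unfold Spec_is_mirrored; infer_instance

-- ===== CLAIM (what is proved, stated in full; the proofs are below) =====
def Claim_equal_is_mirrored : Prop := ∀ (data : String) (left : Int) (right : Int), Dom_is_mirrored data left right → Pre_is_mirrored data left right → Spec_is_mirrored data left right (is_mirrored data left right)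

-- ===== LEMMAS AND PROOFS =====

-- A and B agree on every input (even outside Pre_, where both ports return false at a missing index).
theorem is_mirrored_eq_loop (data : String) (left right : Int) :
    is_mirrored data left right = mirrorLoop data left right := by
  rw [is_mirrored, mirrorLoop]
  by_cases hgt : left > right
  · simp [hgt, if_neg (by omega : ¬ left < right), if_neg (by omega : ¬ left = right)]
  · by_cases heq : left = right
    · simp only [if_neg hgt, if_pos heq, if_neg (by omega : ¬ left < right)]
      cases PySem.Str.pyGet? data left with
      | none => rfl
      | some ch =>
        simp only []
        cases h : mirrorMap.get? ch with
        | none =>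
          have : mirrorMap.contains ch = false := by
            simp [PySem.Dict.contains_eq_isSome_get?, h]
          simp [this, show mirrorMap.get? ch = none from h]
        | some v =>
          have : mirrorMap.contains ch = true := by
            simp [PySem.Dict.contains_eq_isSome_get?, h]
          simp [this, h]
    · simp only [if_neg hgt, if_neg heq, if_pos (by omega : left < right)]
      cases PySem.Str.pyGet? data left with
      | none => rfl
      | some le =>
        cases PySem.Str.pyGet? data right with
        | none => rfl
        | some ri =>
          simp only []
          cases h : mirrorMap.get? le with
          | none =>
            have hc : mirrorMap.contains le = false := by
              simp [PySem.Dict.contains_eq_isSome_get?, h]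
            simp [hc, show mirrorMap.get? le = none from h, bne]
          | some v =>
            have hc : mirrorMap.contains le = true := by
              simp [PySem.Dict.contains_eq_isSome_get?, h]
            by_cases hv : v = ri
            · subst hv
              simp [hc, h, bne, is_mirrored_eq_loop data (left + 1) (right - 1)]
            · simp [hc, h, bne, hv]
termination_by (right - left + 1).toNat
decreasing_by omega

-- ===== VERDICT (by name: the statement is the Claim_ definition above) =====
theorem is_mirrored_spec : Claim_equal_is_mirrored := by
  intro data left right _ _
  unfold Spec_is_mirrored is_mirrored_alt
  exact is_mirrored_eq_loop data left right
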